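-- pv_equiv track=rewrite | github.com/devmax89/tool-report | monitoring_service.py | _get_expected_metrics
-- ===== SOURCE A (Python) =====
-- def _get_expected_metrics(num_sensors):
--     """Restituisce le metriche attese organizzate per categoria"""
--
--     # Centralina Meteo
--     weather_metrics = [
--         'EIT_WINDVEL', 'EIT_WINDDIR1', 'EIT_HUMIDITY',
--         'EIT_TEMPERATURE', 'EIT_PIROMETER'
--     ]
--
--     # Smart Junction Box
--     junction_box_metrics = [
--         'EIT_ACCEL_X', 'EIT_ACCEL_Y', 'EIT_ACCEL_Z',
--         'EIT_INCLIN_X', 'EIT_INCLIN_Y'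
--     ]
--
--     # Sensori di Tiro
--     if num_sensors == 3:
--         load_metrics = [
--             'EIT_LOAD_04_A_L1', 'EIT_LOAD_08_A_L1', 'EIT_LOAD_12_A_L1'
--         ]
--     elif num_sensors == 6:
--         # CORRETTO: Metriche di carico per 6 sensori
--         load_metrics = [
--             'EIT_LOAD_04_A_L1', 'EIT_LOAD_04_B_L1',
--             'EIT_LOAD_08_A_L1', 'EIT_LOAD_08_B_L1',
--             'EIT_LOAD_12_A_L1', 'EIT_LOAD_12_B_L1'
--         ]
--     else:  # 12 sensori
--         load_metrics = []
--         for load in ['04', '08', '12']: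
--             for side in ['A', 'B']:
--                 for line in ['L1', 'L2']:
--                     load_metrics.append(f'EIT_LOAD_{load}_{side}_{line}')
--
--     return weather_metrics + junction_box_metrics + load_metrics
-- ===== SOURCE B (Python) =====
-- def _get_expected_metrics(num_sensors):
--     """Restituisce le metriche attese organizzate per categoria"""
--     sides = ['A'] if num_sensors == 3 else ['A', 'B']
--     lines = ['L1'] if num_sensors in (3, 6) else ['L1', 'L2']
--     return [
--         'EIT_WINDVEL', 'EIT_WINDDIR1', 'EIT_HUMIDITY',
--         'EIT_TEMPERATURE', 'EIT_PIROMETER',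
--         'EIT_ACCEL_X', 'EIT_ACCEL_Y', 'EIT_ACCEL_Z',
--         'EIT_INCLIN_X', 'EIT_INCLIN_Y',
--     ] + [
--         f'EIT_LOAD_{load}_{side}_{line}'
--         for load in ['04', '08', '12']
--         for side in sides
--         for line in lines
--     ]
-- ===== Notes on version B (the rewrite author's own statement) =====
-- stated objective: simpler
-- what changed: Replaces the three hardcoded load-metric list literals (plus a nested append loop) by two small parameters (sides, lines) derived from num_sensors and a single nested comprehension that generates all three cases uniformly.
import Mathlib
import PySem

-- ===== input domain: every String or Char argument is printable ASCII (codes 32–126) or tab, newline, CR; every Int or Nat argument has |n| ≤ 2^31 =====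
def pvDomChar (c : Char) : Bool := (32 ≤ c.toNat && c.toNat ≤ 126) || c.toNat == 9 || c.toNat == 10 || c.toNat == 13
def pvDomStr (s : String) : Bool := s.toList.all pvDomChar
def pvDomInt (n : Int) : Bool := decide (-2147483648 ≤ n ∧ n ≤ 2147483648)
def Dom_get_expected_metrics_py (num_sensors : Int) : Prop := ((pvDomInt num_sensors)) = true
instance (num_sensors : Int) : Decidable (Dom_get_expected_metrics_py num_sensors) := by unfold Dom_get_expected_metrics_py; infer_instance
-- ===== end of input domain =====

-- B replaces the three hardcoded load-metric literals by sides/lines parameters derived from num_sensors and one nested comprehension; objective: simpler.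


-- ===== PORT A =====
-- weather + junction-box literals, three-way branch on num_sensors, else-branch
-- builds load_metrics by the same triple nested loop (foldl append) as the Python.
def get_expected_metrics_py (num_sensors : Int) : List String :=
  let weather_metrics : List String :=
    ["EIT_WINDVEL", "EIT_WINDDIR1", "EIT_HUMIDITY", "EIT_TEMPERATURE", "EIT_PIROMETER"]
  let junction_box_metrics : List String :=
    ["EIT_ACCEL_X", "EIT_ACCEL_Y", "EIT_ACCEL_Z", "EIT_INCLIN_X", "EIT_INCLIN_Y"]
  let load_metrics : List String :=
    if num_sensors == 3 then
      ["EIT_LOAD_04_A_L1", "EIT_LOAD_08_A_L1", "EIT_LOAD_12_A_L1"]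
    else if num_sensors == 6 then
      ["EIT_LOAD_04_A_L1", "EIT_LOAD_04_B_L1",
       "EIT_LOAD_08_A_L1", "EIT_LOAD_08_B_L1",
       "EIT_LOAD_12_A_L1", "EIT_LOAD_12_B_L1"]
    else
      (["04", "08", "12"]).foldl (fun acc load =>
        (["A", "B"]).foldl (fun acc side =>
          (["L1", "L2"]).foldl (fun acc line =>
            acc ++ ["EIT_LOAD_" ++ load ++ "_" ++ side ++ "_" ++ line]) acc) acc) []
  weather_metrics ++ junction_box_metrics ++ load_metrics

-- ===== PORT B =====
-- B: sides/lines derived from num_sensors, one nested comprehension (flatMap).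
def get_expected_metrics_py_alt (num_sensors : Int) : List String :=
  let sides : List String := if num_sensors == 3 then ["A"] else ["A", "B"]
  let lines : List String := if num_sensors == 3 || num_sensors == 6 then ["L1"] else ["L1", "L2"]
  ["EIT_WINDVEL", "EIT_WINDDIR1", "EIT_HUMIDITY", "EIT_TEMPERATURE", "EIT_PIROMETER",
   "EIT_ACCEL_X", "EIT_ACCEL_Y", "EIT_ACCEL_Z", "EIT_INCLIN_X", "EIT_INCLIN_Y"] ++
  (["04", "08", "12"]).flatMap (fun load =>
    sides.flatMap (fun side =>
      lines.map (fun line => "EIT_LOAD_" ++ load ++ "_" ++ side ++ "_" ++ line)))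

-- ===== PRECONDITION & SPEC =====
def Spec_get_expected_metrics_py (num_sensors : Int) (out : List String) : Prop := out = get_expected_metrics_py_alt num_sensors
instance (num_sensors : Int) (out : List String) : Decidable (Spec_get_expected_metrics_py num_sensors out) := by unfold Spec_get_expected_metrics_py; infer_instance

-- ===== CLAIM (what is proved, stated in full; the proofs are below) =====
def Claim_equal_get_expected_metrics_py : Prop := ∀ (num_sensors : Int), Dom_get_expected_metrics_py num_sensors → Spec_get_expected_metrics_py num_sensors (get_expected_metrics_py num_sensors)

-- ===== LEMMAS AND PROOFS =====

-- ===== VERDICT (by name: the statement is the Claim_ definition above) =====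
theorem get_expected_metrics_py_spec : Claim_equal_get_expected_metrics_py := by
  intro n _
  unfold Spec_get_expected_metrics_py get_expected_metrics_py get_expected_metrics_py_alt
  by_cases h3 : n = 3
  · subst h3; decide
  · by_cases h6 : n = 6
    · subst h6; decide
    · simp [h3, h6]
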